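-- pv_equiv track=rewrite | github.com/Ngeschwi/dslr | utils.py | defineDataGradesByHousesInAllCourses
-- ===== SOURCE A (Python) =====
-- def defineDataGradesByHousesInAllCourses(_dataColumnsCourses, _dataHouses):
--     _dataGradesByHousesInAllCourses = [[] for _i in range(len(_dataColumnsCourses))]
--
--     for _i in range(len(_dataGradesByHousesInAllCourses)):
--         _dataGradesByHousesInAllCourses[_i] = [[] for _ in range(4)]
--
--     for _i in range(len(_dataColumnsCourses)):
--         for _j in range(len(_dataColumnsCourses[_i])):
--             if _j != 0:
--                 if _dataColumnsCourses[_i][_j] != '':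
--                     if _dataHouses[_j] == 'Gryffindor':
--                         _dataGradesByHousesInAllCourses[_i][0].append(_dataColumnsCourses[_i][_j])
--                     elif _dataHouses[_j] == 'Hufflepuff':
--                         _dataGradesByHousesInAllCourses[_i][1].append(_dataColumnsCourses[_i][_j])
--                     elif _dataHouses[_j] == 'Ravenclaw':
--                         _dataGradesByHousesInAllCourses[_i][2].append(_dataColumnsCourses[_i][_j])
--                     elif _dataHouses[_j] == 'Slytherin':
--                         _dataGradesByHousesInAllCourses[_i][3].append(_dataColumnsCourses[_i][_j])
--
--     return _dataGradesByHousesInAllCourses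
-- ===== SOURCE B (Python) =====
-- def defineDataGradesByHousesInAllCourses(_dataColumnsCourses, _dataHouses):
--     houses = ['Gryffindor', 'Hufflepuff', 'Ravenclaw', 'Slytherin']
--     cols = {h: [j for j in range(1, len(_dataHouses)) if _dataHouses[j] == h]
--             for h in houses}
--     return [[[row[j] for j in cols[h] if j < len(row) and row[j] != '']
--              for h in houses]
--             for row in _dataColumnsCourses]
-- ===== Notes on version B (the rewrite author's own statement) =====
-- stated objective: alternative
-- what changed: B precomputes, per house, the ascending list of column indices carrying that house, then builds each course's four buckets by gathering over that index table, instead of A's single all-columns loop with a 4-way name branch appending into a mutable nested list.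
import Mathlib
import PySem

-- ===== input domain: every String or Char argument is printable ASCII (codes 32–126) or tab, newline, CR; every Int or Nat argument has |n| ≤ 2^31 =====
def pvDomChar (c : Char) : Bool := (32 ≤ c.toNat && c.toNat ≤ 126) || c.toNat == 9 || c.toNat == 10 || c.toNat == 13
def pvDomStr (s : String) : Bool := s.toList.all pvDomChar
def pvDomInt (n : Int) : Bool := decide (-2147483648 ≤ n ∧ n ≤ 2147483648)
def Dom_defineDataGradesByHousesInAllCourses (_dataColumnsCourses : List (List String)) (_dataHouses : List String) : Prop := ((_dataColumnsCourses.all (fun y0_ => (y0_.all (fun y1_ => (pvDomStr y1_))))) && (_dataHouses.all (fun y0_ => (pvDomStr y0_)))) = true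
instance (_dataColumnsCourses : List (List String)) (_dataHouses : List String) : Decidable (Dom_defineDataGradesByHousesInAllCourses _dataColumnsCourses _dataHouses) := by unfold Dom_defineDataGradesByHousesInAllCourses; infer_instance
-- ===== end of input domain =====

-- B groups column indices per house once, then gathers each course's four buckets
-- from that index table — an alternative decomposition of A's single branching loop;
-- equivalence of the RETURN value is proved on Pre_ (where the Python A returns).

-- ===== PORT A =====
-- helper for `_dataGradesByHousesInAllCourses[_i][k].append(v)` (mutation of the nested list, modelled functionally)
def pvAppendAt (s : List (List (List String))) (i k : Nat) (v : String) : List (List (List String)) :=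
  s.set i ((s.getD i []).set k (((s.getD i []).getD k []) ++ [v]))

def defineDataGradesByHousesInAllCourses (_dataColumnsCourses : List (List String)) (_dataHouses : List String) : List (List (List String)) :=
  -- _dataGradesByHousesInAllCourses = [[] for _i in range(len(_dataColumnsCourses))]
  let s0 : List (List (List String)) :=
    (PySem.List.pyRange 0 (_dataColumnsCourses.length) 1).map (fun _ => [])
  -- for _i in range(len(_dataGradesByHousesInAllCourses)): _dataGradesByHousesInAllCourses[_i] = [[] for _ in range(4)]
  let s1 := (PySem.List.pyRange 0 (s0.length) 1).foldl (fun s i => s.set i.toNat [[], [], [], []]) s0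
  -- the main double loop; `_dataHouses[_j]` raises IndexError when _j ≥ len(_dataHouses):
  -- Pre_ excludes exactly those inputs; the port reads a default "" there.
  (PySem.List.pyRange 0 (_dataColumnsCourses.length) 1).foldl (fun s i =>
    let row := PySem.List.pyGetD _dataColumnsCourses i []
    (PySem.List.pyRange 0 (row.length) 1).foldl (fun s j =>
      if j ≠ 0 then
        if PySem.List.pyGetD row j "" ≠ "" then
          let h := PySem.List.pyGetD _dataHouses j ""
          if h == "Gryffindor" then pvAppendAt s i.toNat 0 (PySem.List.pyGetD row j "")
          else if h == "Hufflepuff" then pvAppendAt s i.toNat 1 (PySem.List.pyGetD row j "")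
          else if h == "Ravenclaw" then pvAppendAt s i.toNat 2 (PySem.List.pyGetD row j "")
          else if h == "Slytherin" then pvAppendAt s i.toNat 3 (PySem.List.pyGetD row j "")
          else s
        else s
      else s) s) s1

-- ===== PORT B =====
def pvHouses : List String := ["Gryffindor", "Hufflepuff", "Ravenclaw", "Slytherin"]

-- cols[h] = [j for j in range(1, len(_dataHouses)) if _dataHouses[j] == h]
def pvCols (_dataHouses : List String) (h : String) : List Int :=
  (PySem.List.pyRange 1 (_dataHouses.length) 1).filter (fun j => PySem.List.pyGetD _dataHouses j "" == h)

-- [row[j] for j in cs if j < len(row) and row[j] != '']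
def pvBucket (row : List String) (cs : List Int) : List String :=
  (cs.filter (fun j => decide (j < (row.length : Int)) && (PySem.List.pyGetD row j "" != ""))).map
    (fun j => PySem.List.pyGetD row j "")

def defineDataGradesByHousesInAllCourses_alt (_dataColumnsCourses : List (List String)) (_dataHouses : List String) : List (List (List String)) :=
  _dataColumnsCourses.map (fun row => pvHouses.map (fun h => pvBucket row (pvCols _dataHouses h)))

-- ===== PRECONDITION & SPEC =====
-- Pre_ excludes exactly the inputs where Python A raises IndexError: a row owning a
-- non-empty cell at a column index j ≥ 1 that is beyond the end of _dataHouses.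
def Pre_defineDataGradesByHousesInAllCourses (_dataColumnsCourses : List (List String)) (_dataHouses : List String) : Prop :=
  ∀ row ∈ _dataColumnsCourses, ∀ j ∈ List.range row.length, j ≠ 0 → row.getD j "" ≠ "" → j < _dataHouses.length
instance (_dataColumnsCourses : List (List String)) (_dataHouses : List String) : Decidable (Pre_defineDataGradesByHousesInAllCourses _dataColumnsCourses _dataHouses) := by unfold Pre_defineDataGradesByHousesInAllCourses; infer_instance

def pvWitness_defineDataGradesByHousesInAllCourses : List (List String) × List String :=
  ([["Arithmancy", "5", "", "7"], ["Potions", "", "3", "1"]], ["Index", "Gryffindor", "Slytherin", "Ravenclaw"])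

def Spec_defineDataGradesByHousesInAllCourses (_dataColumnsCourses : List (List String)) (_dataHouses : List String) (out : List (List (List String))) : Prop := out = defineDataGradesByHousesInAllCourses_alt _dataColumnsCourses _dataHouses
instance (_dataColumnsCourses : List (List String)) (_dataHouses : List String) (out : List (List (List String))) : Decidable (Spec_defineDataGradesByHousesInAllCourses _dataColumnsCourses _dataHouses out) := by unfold Spec_defineDataGradesByHousesInAllCourses; infer_instance

-- ===== CLAIM (what is proved, stated in full; the proofs are below) =====
def Claim_equal_defineDataGradesByHousesInAllCourses : Prop := ∀ (_dataColumnsCourses : List (List String)) (_dataHouses : List String), Dom_defineDataGradesByHousesInAllCourses _dataColumnsCourses _dataHouses → Pre_defineDataGradesByHousesInAllCourses _dataColumnsCourses _dataHouses → Spec_defineDataGradesByHousesInAllCourses _dataColumnsCourses _dataHouses (defineDataGradesByHousesInAllCourses _dataColumnsCourses _dataHouses)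

-- ===== LEMMAS AND PROOFS =====

-- proof-side defs
def pvInit4 : List (List String) := [[], [], [], []]

def pvStepL (houses row : List String) (b : List (List String)) (j : Nat) : List (List String) :=
  if j ≠ 0 then
    if row.getD j "" ≠ "" then
      if houses.getD j "" == "Gryffindor" then b.set 0 ((b.getD 0 []) ++ [row.getD j ""])
      else if houses.getD j "" == "Hufflepuff" then b.set 1 ((b.getD 1 []) ++ [row.getD j ""])
      else if houses.getD j "" == "Ravenclaw" then b.set 2 ((b.getD 2 []) ++ [row.getD j ""])
      else if houses.getD j "" == "Slytherin" then b.set 3 ((b.getD 3 []) ++ [row.getD j ""])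
      else b
    else b
  else b

def pvGStep (houses row : List String) (i : Nat) (s : List (List (List String))) (j : Nat) : List (List (List String)) :=
  if j ≠ 0 then
    if row.getD j "" ≠ "" then
      if houses.getD j "" == "Gryffindor" then pvAppendAt s i 0 (row.getD j "")
      else if houses.getD j "" == "Hufflepuff" then pvAppendAt s i 1 (row.getD j "")
      else if houses.getD j "" == "Ravenclaw" then pvAppendAt s i 2 (row.getD j "")
      else if houses.getD j "" == "Slytherin" then pvAppendAt s i 3 (row.getD j "")
      else s
    else s
  else s

theorem pvGStep_eq (s : List (List (List String))) (i : Nat) (h : i < s.length) {houses row : List String} {j : Nat} :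
    pvGStep houses row i s j = s.set i (pvStepL houses row (s.getD i []) j) := by
  have hself : s.set i (s[i]?.getD []) = s := by
    have : s[i]?.getD [] = s[i] := by simp [List.getElem?_eq_getElem h]
    rw [this]; exact List.set_getElem_self h
  unfold pvGStep pvStepL pvAppendAt
  split_ifs <;> simp [List.getD, hself]

-- lifted inner fold
theorem pvFold_lift (houses row : List String) (L : List Nat) : ∀ (s : List (List (List String))) (i : Nat), i < s.length →
    L.foldl (pvGStep houses row i) s = s.set i (L.foldl (pvStepL houses row) (s.getD i [])) := by
  induction L with
  | nil =>
    intro s i h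
    rw [List.getD_eq_getElem s [] h]
    exact (List.set_getElem_self h).symm
  | cons j L ih =>
    intro s i h
    rw [List.foldl_cons, List.foldl_cons, pvGStep_eq s i h,
      ih _ i (by simp [h]), List.set_set]
    congr 1
    rw [List.getD_eq_getElem _ [] (by simp [h] : i < (s.set i (pvStepL houses row (s.getD i []) j)).length)]
    simp



def pvRowA (houses row : List String) : List (List String) :=
  (List.range row.length).foldl (pvStepL houses row) pvInit4

-- fill loop: setting every index to c yields a replicate
theorem pvSetFold (c : List (List String)) : ∀ (m : Nat) (s : List (List (List String))), m ≤ s.length →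
    (List.range m).foldl (fun s i => s.set i c) s = List.replicate m c ++ s.drop m := by
  intro m
  induction m with
  | zero => simp
  | succ m ih =>
    intro s h
    rw [List.range_succ, List.foldl_append, ih s (by omega)]
    rw [List.foldl_cons, List.foldl_nil]
    apply List.ext_getElem
    · simp; omega
    · intro k h1 h2
      by_cases hk : k < m
      · rw [List.getElem_set_ne (by omega)]
        rw [List.getElem_append_left (by simp; omega), List.getElem_append_left (by simp; omega)]
        simp
      · by_cases hk2 : k = m
        · subst hk2
          rw [List.getElem_set_self (by simp at h2 ⊢; omega)]
          rw [List.getElem_append_left (by simp)]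
          simp
        · rw [List.getElem_set_ne (by omega)]
          rw [List.getElem_append_right (by simp; omega), List.getElem_append_right (by simp; omega)]
          simp
          congr 1
          omega

-- outer loop: processing prefix of rows
theorem pvOuterFold (houses : List String) (rows : List (List String)) :
    ∀ (n : Nat), n ≤ rows.length →
    (List.range n).foldl
      (fun s i => (List.range ((rows.getD i []).length)).foldl (pvGStep houses (rows.getD i []) i) s)
      (List.replicate rows.length pvInit4)
    = (rows.take n).map (fun row => pvRowA houses row) ++ List.replicate (rows.length - n) pvInit4 := by
  intro n
  induction n with
  | zero => simp
  | succ n ih =>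
    intro h
    rw [List.range_succ, List.foldl_append, ih (by omega), List.foldl_cons, List.foldl_nil]
    have hlen : ((rows.take n).map (fun row => pvRowA houses row) ++ List.replicate (rows.length - n) pvInit4).length = rows.length := by
      simp; omega
    rw [pvFold_lift houses _ _ _ n (by rw [hlen]; omega)]
    have hget : (List.map (fun row => pvRowA houses row) (List.take n rows) ++ List.replicate (rows.length - n) pvInit4).getD n [] = pvInit4 := by
      rw [List.getD_eq_getElem _ [] (by rw [hlen]; omega)]
      rw [List.getElem_append_right (by simp)]
      simp
    rw [hget]
    have hrn : rows[n]?.getD ([] : List String) = rows[n]'(by omega) := by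
      rw [List.getElem?_eq_getElem (by omega)]; rfl
    apply List.ext_getElem
    · simp; omega
    · intro k h1 h2
      by_cases hk : k < n
      · rw [List.getElem_set_ne (by omega)]
        rw [List.getElem_append_left (by simp; omega), List.getElem_append_left (by simp; omega)]
        simp [List.getElem_take]
      · by_cases hk2 : k = n
        · subst hk2
          rw [List.getElem_set_self (by simp; omega)]
          rw [List.getElem_append_left (by simp; omega)]
          simp [List.getElem_take, pvRowA, hrn]
        · rw [List.getElem_set_ne (by omega)]
          rw [List.getElem_append_right (by simp; omega), List.getElem_append_right (by simp; omega)]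
          simp

theorem pvA_norm (rows : List (List String)) (houses : List String) :
    defineDataGradesByHousesInAllCourses rows houses
    = (List.range rows.length).foldl
        (fun s i => (List.range ((rows.getD i []).length)).foldl (pvGStep houses (rows.getD i []) i) s)
        (List.replicate rows.length pvInit4) := by
  unfold defineDataGradesByHousesInAllCourses
  simp only [PySem.List.pyRange_one, Int.sub_zero, Int.toNat_natCast, List.foldl_map, zero_add,
    PySem.List.pyGetD_natCast, List.length_map, List.length_range]
  rw [pvSetFold ([[], [], [], []]) rows.length _ (by simp [List.length_range])]
  rw [List.drop_of_length_le (by simp [List.length_range])]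
  rw [List.append_nil]
  show _ = _
  congr 1
  funext s i
  congr 1
  funext s j
  simp only [pvGStep, pvAppendAt, ne_eq, Nat.cast_eq_zero]

theorem pvA_rows (rows : List (List String)) (houses : List String) :
    defineDataGradesByHousesInAllCourses rows houses = rows.map (fun row => pvRowA houses row) := by
  rw [pvA_norm, pvOuterFold houses rows rows.length (le_refl _)]
  simp

def pvGath (houses row : List String) (H : String) (n : Nat) : List String :=
  ((List.range n).filter (fun j => decide (j ≠ 0) && (row.getD j "" != "") && (houses.getD j "" == H))).map
    (fun j => row.getD j "")

theorem pvRowA_gath (houses row : List String) : ∀ (n : Nat),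
    (List.range n).foldl (pvStepL houses row) pvInit4
    = [pvGath houses row "Gryffindor" n, pvGath houses row "Hufflepuff" n,
       pvGath houses row "Ravenclaw" n, pvGath houses row "Slytherin" n] := by
  intro n
  induction n with
  | zero => simp [pvGath, pvInit4]
  | succ n ih =>
    rw [List.range_succ, List.foldl_append, ih, List.foldl_cons, List.foldl_nil]
    simp only [pvGath, List.range_succ, List.filter_append, List.map_append, pvStepL]
    split_ifs with h1 h2 h3 h4 h5 h6 <;>
      simp_all [beq_iff_eq]

-- range-extension: filter vanishes above n
theorem pvExtend (p : Nat → Bool) (n : Nat) (hp : ∀ j, n ≤ j → p j = false) :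
    ∀ (m : Nat), (List.range (n + m)).filter p = (List.range n).filter p := by
  intro m
  induction m with
  | zero => rfl
  | succ m ih =>
    rw [← ih]
    rw [show n + (m + 1) = (n + m) + 1 by omega, List.range_succ, List.filter_append]
    simp [hp (n + m) (by omega)]

theorem pvExtend' (p : Nat → Bool) {n N : Nat} (h : n ≤ N) (hp : ∀ j, n ≤ j → p j = false) :
    (List.range N).filter p = (List.range n).filter p := by
  rw [show N = n + (N - n) by omega]
  exact pvExtend p n hp (N - n)

def pvGathB (houses row : List String) (H : String) : List String :=
  ((List.range houses.length).filter
      (fun j => decide (j ≠ 0) && (houses.getD j "" == H) && decide (j < row.length) && (row.getD j "" != ""))).map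
    (fun j => row.getD j "")

theorem pvBucket_eq (houses row : List String) (H : String) :
    pvBucket row (pvCols houses H) = pvGathB houses row H := by
  unfold pvBucket pvCols
  rw [PySem.List.pyRange_one]
  have hf : (fun k : Nat => (1 : Int) + ↑k) = (fun k : Nat => ((k + 1 : Nat) : Int)) := by
    funext k; push_cast; ring
  rw [hf]
  have hn : ((houses.length : Int) - 1).toNat = houses.length - 1 := by omega
  rw [hn]
  simp only [List.filter_map, List.map_map, Function.comp_def, PySem.List.pyGetD_natCast, Nat.cast_lt]
  unfold pvGathB
  cases houses with
  | nil => simp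
  | cons h0 hs =>
    rw [show (h0 :: hs).length = hs.length + 1 by simp, List.range_succ_eq_map]
    simp only [Nat.succ_eq_add_one, List.filter_cons, List.filter_map, Function.comp_def]
    simp only [show (decide ((0:Nat) ≠ 0)) = false from rfl, Bool.false_and,
      show ((false : Bool) = true) = False by simp, if_false, Nat.add_sub_cancel,
      List.map_map, Function.comp_def, Nat.succ_eq_add_one]
    rw [List.filter_filter]
    apply congrArg
    apply List.filter_congr
    intro j hj
    cases hG : ((h0 :: hs).getD (j + 1) "" == H) <;>
      cases hr : decide (j + 1 < row.length) <;>
        cases hc : (row.getD (j + 1) "" != "") <;> simp [hG, hr, hc]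

theorem pvGath_eq (houses row : List String) (H : String) (hH : H ≠ "") :
    pvGath houses row H row.length = pvGathB houses row H := by
  unfold pvGath pvGathB
  congr 1
  have e1 := pvExtend' (fun j => decide (j ≠ 0) && (row.getD j "" != "") && (houses.getD j "" == H))
    (le_max_left row.length houses.length)
    (by intro j hj
        have : row[j]? = none := List.getElem?_eq_none (by omega)
        simp [this])
  have e2 := pvExtend' (fun j => decide (j ≠ 0) && (houses.getD j "" == H) && decide (j < row.length) && (row.getD j "" != ""))
    (le_max_right row.length houses.length)
    (by intro j hj
        have : houses[j]? = none := List.getElem?_eq_none (by omega)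
        simp [this, beq_iff_eq, Ne.symm hH])
  rw [← e1, ← e2]
  apply List.filter_congr
  intro j hj
  by_cases hr : j < row.length
  · cases h0 : decide (j ≠ 0) <;> cases hG : (houses.getD j "" == H) <;>
      cases hc : (row.getD j "" != "") <;> simp [h0, hG, hc, hr]
  · have : row[j]? = none := List.getElem?_eq_none (by omega)
    simp [this, hr]

theorem pvMain (rows : List (List String)) (houses : List String) :
    defineDataGradesByHousesInAllCourses rows houses = defineDataGradesByHousesInAllCourses_alt rows houses := by
  rw [pvA_rows]
  unfold defineDataGradesByHousesInAllCourses_alt pvHouses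
  apply List.map_congr_left
  intro row _
  rw [pvRowA, pvRowA_gath]
  simp only [List.map_cons, List.map_nil]
  rw [pvBucket_eq, pvBucket_eq, pvBucket_eq, pvBucket_eq,
    pvGath_eq _ _ _ (by decide), pvGath_eq _ _ _ (by decide),
    pvGath_eq _ _ _ (by decide), pvGath_eq _ _ _ (by decide)]


-- ===== VERDICT (by name: the statement is the Claim_ definition above) =====
theorem defineDataGradesByHousesInAllCourses_spec : Claim_equal_defineDataGradesByHousesInAllCourses := by
  intro rows houses _ _
  unfold Spec_defineDataGradesByHousesInAllCourses
  exact pvMain rows houses
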